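-- pv_equiv track=rewrite | github.com/Alexerson/adventofcode | 2017/day21.py | merge_drawing
-- ===== SOURCE A (Python) =====
-- import math
--
-- def merge_drawing(pieces):
--     size = int(math.sqrt(sum(bit != '/' for piece in pieces for bit in piece)))
--     out = [''] * size
--     line_index = 0
--     col_index = 0
--     for piece in pieces:
--         for index, line in enumerate(piece.split("/")):
--             out[index + line_index] += line
--         col_index += len(piece.split("/"))
--         if col_index >= size:
--             line_index += len(piece.split("/"))
--             col_index = 0
--
--     return '/'.join(out)
-- ===== SOURCE B (Python) =====
-- import math
--
-- def merge_drawing(pieces):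
--     size = math.isqrt(sum(bit != '/' for piece in pieces for bit in piece))
--     events = []
--     row = col = 0
--     for piece in pieces:
--         lines = piece.split('/')
--         for j, line in enumerate(lines):
--             events.append((row + j, line))
--         col += len(lines)
--         if col >= size:
--             row += len(lines)
--             col = 0
--     events.sort(key=lambda e: e[0])  # stable: keeps piece order within a row
--     out = [''] * size
--     i = 0
--     while i < len(events):
--         r = events[i][0]
--         j = i
--         while j < len(events) and events[j][0] == r:
--             j += 1
--         out[r] = ''.join(line for _, line in events[i:j])
--         i = j
--     return '/'.join(out)
-- ===== Notes on version B (the rewrite author's own statement) =====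
-- stated objective: alternative
-- what changed: B replaces A's scatter (concatenating each piece's lines onto a mutable output array at running counter offsets) with an event-list pipeline: it emits (row, line) pairs, stable-sorts them by row, and assembles the drawing by setting each output row exactly once from its contiguous group of events.
import Mathlib
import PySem

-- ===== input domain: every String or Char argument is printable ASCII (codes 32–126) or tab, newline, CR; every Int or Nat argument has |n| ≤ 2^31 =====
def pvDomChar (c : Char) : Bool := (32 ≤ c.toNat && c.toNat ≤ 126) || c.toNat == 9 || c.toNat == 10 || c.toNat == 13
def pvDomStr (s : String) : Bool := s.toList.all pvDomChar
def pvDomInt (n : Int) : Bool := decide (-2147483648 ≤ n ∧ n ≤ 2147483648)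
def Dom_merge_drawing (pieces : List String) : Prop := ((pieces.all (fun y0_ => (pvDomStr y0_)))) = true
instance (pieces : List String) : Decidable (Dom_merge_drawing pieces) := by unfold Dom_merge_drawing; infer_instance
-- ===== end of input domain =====

-- B replaces A's scatter (writing each piece's lines into the output array by running string
-- concatenation at counter offsets) with an event list of (row, line) pairs, a stable sort by
-- row, and a group-by-row assembly that sets each output row once (objective: alternative).

-- ===== PORT A =====
-- Python computes int(math.sqrt(total)) with a float sqrt; ported as Nat.sqrt, exact on the
-- totals the behavioural inputs reach (float sqrt is exact below 2^52 up to the int cast).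
-- Python raises IndexError when index + line_index ≥ size; List.set / List.getD are a no-op /
-- default there — exactly those inputs are excluded by Pre_.
def merge_drawing (pieces : List String) : String :=
  let size : Nat :=
    Nat.sqrt (List.sum (pieces.map (fun piece =>
      List.countP (fun bit => bit != '/') piece.toList)))
  let fin : List (List Char) × Nat × Nat :=
    pieces.foldl (fun st piece =>
      let lines := PySem.Chars.splitOn piece.toList ['/']
      let out := (List.zipIdx lines).foldl
        (fun o il => o.set (il.2 + st.2.1) ((o.getD (il.2 + st.2.1) []) ++ il.1)) st.1
      let ci := st.2.2 + lines.length
      if size ≤ ci then (out, st.2.1 + lines.length, 0) else (out, st.2.1, ci))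
      (List.replicate size [], 0, 0)
  String.ofList (PySem.Chars.join ['/'] fin.1)

-- ===== PORT B =====
-- the while-loop over indices i, j of Source B, as the obvious structural recursion on the sorted
-- event list: one step takes the run of events of the head's row (events[i:j]), sets that row,
-- and recurses on the rest. Python's out[r] = … raises IndexError when r ≥ len(out); List.set
-- is a no-op there — exactly those inputs are excluded by Pre_.
def assembleB (out : List (List Char)) : List (Nat × List Char) → List (List Char)
  | [] => out
  | e :: rest =>
    let grp := e :: rest.takeWhile (fun f => f.1 == e.1)
    assembleB (out.set e.1 (grp.map Prod.snd).flatten)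
      (rest.dropWhile (fun f => f.1 == e.1))
  termination_by evs => evs.length
  decreasing_by
    exact Nat.lt_succ_of_le (List.length_dropWhile_le _ _)

def merge_drawing_alt (pieces : List String) : String :=
  let size : Nat :=
    Nat.sqrt (List.sum (pieces.map (fun piece =>
      List.countP (fun bit => bit != '/') piece.toList)))
  let ev : List (Nat × List Char) × Nat × Nat :=
    pieces.foldl (fun st piece =>
      let lines := PySem.Chars.splitOn piece.toList ['/']
      let events := st.1 ++ (List.zipIdx lines).map (fun lj => (st.2.1 + lj.2, lj.1))
      let ci := st.2.2 + lines.length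
      if size ≤ ci then (events, st.2.1 + lines.length, 0) else (events, st.2.1, ci))
      ([], 0, 0)
  let sortedEv := PySem.List.sorted ev.1 (fun e => e.1)
  String.ofList (PySem.Chars.join ['/'] (assembleB (List.replicate size []) sortedEv))

-- ===== PRECONDITION & SPEC =====
-- kernel-computable integer square root, used only by Pre_ (Nat.sqrt does not reduce)
def pvIsqrt (n : Nat) : Nat :=
  (List.range (n + 1)).countP (fun m => decide (m * m ≤ n)) - 1

-- the output row at which each piece is placed, determined by the piece shapes alone
def pvStarts (size : Nat) (li ci : Nat) : List (List (List Char)) → List Nat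
  | [] => []
  | b :: bs =>
    li :: (if size ≤ ci + b.length then pvStarts size (li + b.length) 0 bs
           else pvStarts size li (ci + b.length) bs)

-- Pre_ excludes exactly the inputs on which both Pythons raise IndexError: those where some
-- piece's placement row plus its line count exceeds the computed output size.
def Pre_merge_drawing (pieces : List String) : Prop :=
  let blocks := pieces.map (fun piece => PySem.Chars.splitOn piece.toList ['/'])
  let size := pvIsqrt (List.sum (pieces.map (fun piece =>
    List.countP (fun bit => bit != '/') piece.toList)))
  ∀ sb ∈ (pvStarts size 0 0 blocks).zip blocks, sb.1 + sb.2.length ≤ size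
instance (pieces : List String) : Decidable (Pre_merge_drawing pieces) := by
  unfold Pre_merge_drawing; infer_instance

def pvWitness_merge_drawing : List String := ["#./..", "##/#.", "../..", ".#/.#"]

def Spec_merge_drawing (pieces : List String) (out : String) : Prop := out = merge_drawing_alt pieces
instance (pieces : List String) (out : String) : Decidable (Spec_merge_drawing pieces out) := by unfold Spec_merge_drawing; infer_instance

-- ===== CLAIM (what is proved, stated in full; the proofs are below) =====
def Claim_equal_merge_drawing : Prop := ∀ (pieces : List String), Dom_merge_drawing pieces → Pre_merge_drawing pieces → Spec_merge_drawing pieces (merge_drawing pieces)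

-- ===== LEMMAS AND PROOFS =====

-- A's loop body, abstracted over the split result
def stepA (size : Nat) (st : List (List Char) × Nat × Nat) (lines : List (List Char)) :
    List (List Char) × Nat × Nat :=
  let out := (List.zipIdx lines).foldl
    (fun o il => o.set (il.2 + st.2.1) ((o.getD (il.2 + st.2.1) []) ++ il.1)) st.1
  let ci := st.2.2 + lines.length
  if size ≤ ci then (out, st.2.1 + lines.length, 0) else (out, st.2.1, ci)

-- B's event-building loop body, abstracted over the split result
def stepE (size : Nat) (st : List (Nat × List Char) × Nat × Nat) (lines : List (List Char)) :
    List (Nat × List Char) × Nat × Nat :=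
  let events := st.1 ++ (List.zipIdx lines).map (fun lj => (st.2.1 + lj.2, lj.1))
  let ci := st.2.2 + lines.length
  if size ≤ ci then (events, st.2.1 + lines.length, 0) else (events, st.2.1, ci)

def pvSize (pieces : List String) : Nat :=
  Nat.sqrt (List.sum (pieces.map (fun piece =>
    List.countP (fun bit => bit != '/') piece.toList)))

-- the merged output line r: the r-th line of every piece placed across row r, in piece order
def pvGatherLine (pairs : List (List (List Char) × Nat)) (r : Nat) : List Char :=
  pairs.flatMap (fun sb =>
    if sb.2 ≤ r ∧ r < sb.2 + sb.1.length then sb.1.getD (r - sb.2) [] else [])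

-- the flat event list of the placed pieces, and the content of output row r read off it
def pvEvents (pairs : List (List (List Char) × Nat)) : List (Nat × List Char) :=
  pairs.flatMap (fun bs => (List.zipIdx bs.1).map (fun lj => (bs.2 + lj.2, lj.1)))

def pvRow (evs : List (Nat × List Char)) (r : Nat) : List Char :=
  ((evs.filter (fun e => e.1 == r)).map Prod.snd).flatten

lemma A_char (pieces : List String) :
    merge_drawing pieces = String.ofList (PySem.Chars.join ['/']
      (((pieces.map (fun p => PySem.Chars.splitOn p.toList ['/'])).foldl
        (stepA (pvSize pieces)) (List.replicate (pvSize pieces) [], 0, 0)).1)) := by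
  simp only [merge_drawing, pvSize, stepA, List.foldl_map]

lemma B_char (pieces : List String) :
    merge_drawing_alt pieces = String.ofList (PySem.Chars.join ['/']
      (assembleB (List.replicate (pvSize pieces) [])
        (PySem.List.sorted (((pieces.map (fun p => PySem.Chars.splitOn p.toList ['/'])).foldl
          (stepE (pvSize pieces)) ([], 0, 0)).1) (fun e => e.1)))) := by
  simp only [merge_drawing_alt, pvSize, stepE, List.foldl_map]

lemma map_getD_range_self {α : Type} (o : List (List α)) :
    (List.range o.length).map (fun r => o.getD r []) = o := by
  apply List.ext_getElem
  · simp
  · intro i h1 h2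
    simp [List.getD_eq_getElem?_getD, List.getElem?_eq_getElem h2]

lemma getD_map_range' {α : Type} (f : Nat → List α) (n r : Nat) (h : r < n) :
    ((List.range n).map f).getD r [] = f r := by
  rw [List.getD_eq_getElem?_getD, List.getElem?_map]
  simp [List.getElem?_range h]

lemma write_pointwise {α : Type} (lines : List (List α)) :
    ∀ (o : List (List α)) (li j : Nat),
      (List.zipIdx lines j).foldl
          (fun o il => o.set (il.2 + li) ((o.getD (il.2 + li) []) ++ il.1)) o
        = (List.range o.length).map (fun r =>
            o.getD r [] ++ (if li + j ≤ r ∧ r < li + j + lines.length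
              then lines.getD (r - (li + j)) [] else [])) := by
  induction lines with
  | nil =>
    intro o li j
    have : ∀ r, (if li + j ≤ r ∧ r < li + j + ([] : List (List α)).length
        then ([] : List (List α)).getD (r - (li + j)) [] else []) = ([] : List α) := by
      intro r
      split_ifs with h
      · simp at h; omega
      · rfl
    simp only [List.zipIdx_nil, List.foldl_nil, this, List.append_nil]
    exact (map_getD_range_self o).symm
  | cons l ls ih =>
    intro o li j
    rw [List.zipIdx_cons, List.foldl_cons]
    have hset_len : (o.set (li + j) (o.getD (li + j) [] ++ l)).length = o.length := by
      simp
    rw [show j + li = li + j by omega] at *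
    rw [ih (o.set (li + j) (o.getD (li + j) [] ++ l)) li (j + 1)]
    rw [hset_len]
    apply List.map_congr_left
    intro r hr
    rw [List.mem_range] at hr
    rcases Nat.lt_trichotomy r (li + j) with hlt | heq | hgt
    · have h1 : (o.set (li + j) (o.getD (li + j) [] ++ l)).getD r [] = o.getD r [] := by
        simp [List.getD_eq_getElem?_getD, List.getElem?_set_ne (by omega : li + j ≠ r)]
      rw [h1]
      rw [if_neg (by omega), if_neg (by simp; omega)]
    · subst heq
      have h1 : (o.set (li + j) (o.getD (li + j) [] ++ l)).getD (li + j) []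
          = o.getD (li + j) [] ++ l := by
        simp [List.getD_eq_getElem?_getD, List.getElem?_set_self (by omega : li + j < o.length)]
      rw [h1]
      rw [if_neg (by omega), if_pos (by simp only [List.length_cons]; omega)]
      simp
    · have h1 : (o.set (li + j) (o.getD (li + j) [] ++ l)).getD r [] = o.getD r [] := by
        simp [List.getD_eq_getElem?_getD, List.getElem?_set_ne (by omega : li + j ≠ r)]
      rw [h1]
      by_cases hc : r < li + j + 1 + ls.length
      · rw [if_pos (by omega), if_pos (by simp only [List.length_cons]; omega)]
        rw [show r - (li + j) = (r - (li + (j + 1))) + 1 by omega, List.getD_cons_succ]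
      · rw [if_neg (by omega), if_neg (by simp only [List.length_cons]; omega)]

lemma gather_cons (b : List (List Char)) (li r : Nat)
    (ps : List (List (List Char) × Nat)) :
    pvGatherLine ((b, li) :: ps) r
      = (if li ≤ r ∧ r < li + b.length then b.getD (r - li) [] else [])
        ++ pvGatherLine ps r := by
  simp [pvGatherLine]

lemma mainLemma (size : Nat) :
    ∀ (bs : List (List (List Char))) (o : List (List Char)) (li ci : Nat),
      o.length = size →
      (List.foldl (stepA size) (o, li, ci) bs).1
        = (List.range size).map (fun r =>
            o.getD r [] ++ pvGatherLine (bs.zip (pvStarts size li ci bs)) r) := by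
  intro bs
  induction bs with
  | nil =>
    intro o li ci hlen
    subst hlen
    simpa [pvStarts, pvGatherLine] using (map_getD_range_self o).symm
  | cons b bs ih =>
    intro o li ci hlen
    have hw := write_pointwise b o li 0
    rw [hlen] at hw
    rw [List.foldl_cons]
    simp only [stepA, hw]
    by_cases h : size ≤ ci + b.length
    · rw [if_pos h]
      rw [ih _ (li + b.length) 0 (by simp)]
      rw [show pvStarts size li ci (b :: bs) = li :: pvStarts size (li + b.length) 0 bs by
        rw [pvStarts, if_pos h]]
      rw [List.zip_cons_cons]
      apply List.map_congr_left
      intro r hr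
      rw [List.mem_range] at hr
      rw [getD_map_range' _ size r hr, gather_cons, List.append_assoc]
      simp only [Nat.add_zero]
    · rw [if_neg h]
      rw [ih _ li (ci + b.length) (by simp)]
      rw [show pvStarts size li ci (b :: bs) = li :: pvStarts size li (ci + b.length) bs by
        rw [pvStarts, if_neg h]]
      rw [List.zip_cons_cons]
      apply List.map_congr_left
      intro r hr
      rw [List.mem_range] at hr
      rw [getD_map_range' _ size r hr, gather_cons, List.append_assoc]
      simp only [Nat.add_zero]

-- one piece's events restricted to row r: exactly its line covering r, if any
lemma ev_fold (size : Nat) (bs : List (List (List Char))) :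
    ∀ (acc : List (Nat × List Char)) (li ci : Nat),
      (bs.foldl (stepE size) (acc, li, ci)).1
        = acc ++ pvEvents (bs.zip (pvStarts size li ci bs)) := by
  induction bs with
  | nil => intro acc li ci; simp [pvEvents]
  | cons b bs ih =>
    intro acc li ci
    rw [List.foldl_cons]
    by_cases h : size ≤ ci + b.length
    · simp only [stepE, if_pos h]
      rw [ih, show pvStarts size li ci (b :: bs) = li :: pvStarts size (li + b.length) 0 bs by
        rw [pvStarts, if_pos h], List.zip_cons_cons]
      simp [pvEvents]
    · simp only [stepE, if_neg h]
      rw [ih, show pvStarts size li ci (b :: bs) = li :: pvStarts size li (ci + b.length) bs by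
        rw [pvStarts, if_neg h], List.zip_cons_cons]
      simp [pvEvents]

lemma ev_filter {α : Type} (b : List (List α)) :
    ∀ (n s r : Nat),
      (((List.zipIdx b n).map (fun lj => (s + lj.2, lj.1))).filter
        (fun e => e.1 == r)).map Prod.snd
      = (if s + n ≤ r ∧ r < s + n + b.length then [b.getD (r - (s + n)) []] else []) := by
  induction b with
  | nil => intro n s r; simp
  | cons x xs ih =>
    intro n s r
    rw [List.zipIdx_cons]
    simp only [List.map_cons, List.filter_cons]
    by_cases hx : s + n = r
    · have : ((s + n, x) : Nat × List α).1 == r := by simp [hx]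
      simp only [this, if_pos]
      have hnone : (((List.zipIdx xs (n+1)).map (fun lj => (s + lj.2, lj.1))).filter
          (fun e => e.1 == r)).map Prod.snd = [] := by
        rw [ih (n+1) s r, if_neg (by omega)]
      rw [List.map_cons]
      have h2 : ((List.zipIdx xs (n+1)).map (fun lj => (s + lj.2, lj.1))).filter
          (fun e => e.1 == r) = [] := by
        simpa using hnone
      rw [h2]
      rw [if_pos (by simp only [List.length_cons]; omega)]
      simp only [show r - (s + n) = 0 by omega, List.getD_cons_zero, List.map_nil,
        List.map_cons]
    · have : (((s + n, x) : Nat × List α).1 == r) = false := by simp [hx]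
      simp only [this, Bool.false_eq_true, if_false]
      rw [ih (n+1) s r]
      by_cases hc : s + (n + 1) ≤ r ∧ r < s + (n + 1) + xs.length
      · rw [if_pos hc, if_pos (by simp only [List.length_cons]; omega)]
        rw [show r - (s + n) = (r - (s + (n+1))) + 1 by omega, List.getD_cons_succ]
      · rw [if_neg hc, if_neg (by simp only [List.length_cons]; omega)]

lemma gather_eq_row (pairs : List (List (List Char) × Nat)) (r : Nat) :
    pvGatherLine pairs r = pvRow (pvEvents pairs) r := by
  induction pairs with
  | nil => simp [pvGatherLine, pvEvents, pvRow]
  | cons sb ps ih =>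
    obtain ⟨b, s⟩ := sb
    simp only [pvGatherLine, pvEvents, pvRow, List.flatMap_cons, List.filter_append,
      List.map_append, List.flatten_append] at ih ⊢
    have hev := ev_filter b 0 s r
    simp only [Nat.add_zero] at hev
    rw [hev, ih]
    by_cases hc : s ≤ r ∧ r < s + b.length
    · rw [if_pos hc, if_pos hc]; simp
    · rw [if_neg hc, if_neg hc]; rfl

lemma insertBy_cons (x y : Nat × List Char) (ys : List (Nat × List Char)) :
    PySem.List.insertBy (fun a b => decide (a.1 < b.1)) x (y :: ys)
      = if x.1 < y.1 then x :: y :: ys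
        else y :: PySem.List.insertBy (fun a b => decide (a.1 < b.1)) x ys := by
  by_cases h : x.1 < y.1
  · simp only [if_pos h]
    show (if (decide (x.1 < y.1)) = true then _ else _) = _
    simp [h]
  · simp only [if_neg h]
    show (if (decide (x.1 < y.1)) = true then _ else _) = _
    simp [h]

lemma insertBy_pairwise (x : Nat × List Char) (acc : List (Nat × List Char))
    (h : acc.Pairwise (fun a b => a.1 ≤ b.1)) :
    (PySem.List.insertBy (fun a b => decide (a.1 < b.1)) x acc).Pairwise
      (fun a b => a.1 ≤ b.1) := by
  induction acc with
  | nil => simp [PySem.List.insertBy]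
  | cons y ys ih =>
    rw [List.pairwise_cons] at h
    rw [insertBy_cons]
    split_ifs with hb
    · rw [List.pairwise_cons]
      constructor
      · intro z hz
        rcases List.mem_cons.mp hz with hz | hz
        · subst hz; omega
        · have := h.1 z hz; omega
      · rw [List.pairwise_cons]; exact h
    · rw [List.pairwise_cons]
      constructor
      · intro z hz
        rcases (PySem.List.mem_insertBy _ _ _ _).mp hz with h' | h'
        · subst h'; omega
        · exact h.1 z h'
      · exact ih h.2

lemma filter_insertBy (x : Nat × List Char) (r : Nat) (acc : List (Nat × List Char))
    (h : acc.Pairwise (fun a b => a.1 ≤ b.1)) :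
    (PySem.List.insertBy (fun a b => decide (a.1 < b.1)) x acc).filter (fun e => e.1 == r)
      = acc.filter (fun e => e.1 == r) ++ (if x.1 == r then [x] else []) := by
  induction acc with
  | nil =>
    show ([x].filter (fun e => e.1 == r)) = _
    rw [List.filter_cons]
    by_cases hx : x.1 = r
    · simp [hx]
    · simp [hx]
  | cons y ys ih =>
    rw [List.pairwise_cons] at h
    rw [insertBy_cons]
    by_cases hb : x.1 < y.1
    · rw [if_pos hb, List.filter_cons]
      by_cases hx : x.1 = r
      · have hx' : (x.1 == r) = true := by simp [hx]
        have hy : (y.1 == r) = false := by simp; omega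
        have hys : ys.filter (fun e => e.1 == r) = [] := by
          rw [List.filter_eq_nil_iff]
          intro e he
          have := h.1 e he; simp; omega
        rw [List.filter_cons] at *
        simp [hx', hy, hys]
      · have hx' : (x.1 == r) = false := by simp [hx]
        simp [hx']
    · rw [if_neg hb, List.filter_cons, List.filter_cons, ih h.2]
      by_cases hy : y.1 = r
      · have : (y.1 == r) = true := by simp [hy]
        simp [this]
      · have : (y.1 == r) = false := by simp [hy]
        simp [this]

lemma filter_sorted (evs : List (Nat × List Char)) (r : Nat) :
    (PySem.List.sorted evs (fun e => e.1)).filter (fun e => e.1 == r)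
      = evs.filter (fun e => e.1 == r) := by
  rw [PySem.List.sorted_eq_foldl_insertBy]
  suffices h : ∀ (acc : List (Nat × List Char)), acc.Pairwise (fun a b => a.1 ≤ b.1) →
      (evs.foldl (fun acc x => PySem.List.insertBy (fun a b => decide (a.1 < b.1)) x acc)
        acc).filter (fun e => e.1 == r)
      = acc.filter (fun e => e.1 == r) ++ evs.filter (fun e => e.1 == r) by
    simpa using h [] (by simp)
  induction evs with
  | nil => intro acc hacc; simp
  | cons x xs ih =>
    intro acc hacc
    rw [List.foldl_cons, ih _ (insertBy_pairwise x acc hacc), filter_insertBy x r acc hacc,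
      List.filter_cons]
    by_cases hx : x.1 = r
    · simp [hx]
    · have : (x.1 == r) = false := by simp [hx]
      simp [this]

lemma run_take (k : Nat) (rest : List (Nat × List Char)) :
    rest.Pairwise (fun a b => a.1 ≤ b.1) → (∀ f ∈ rest, k ≤ f.1) →
    rest.takeWhile (fun f => f.1 == k) = rest.filter (fun f => f.1 == k) := by
  induction rest with
  | nil => intro _ _; rfl
  | cons f fs ih =>
    intro hp hlb
    rw [List.pairwise_cons] at hp
    rw [List.takeWhile_cons, List.filter_cons]
    by_cases hf : f.1 = k
    · rw [ih hp.2 (fun g hg => by have := hp.1 g hg; omega)]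
      have hb : (f.1 == k) = true := by simp [hf]
      rw [hb]
      simp
    · have hk : k < f.1 := by have := hlb f (by simp); omega
      have : (f.1 == k) = false := by simp [hf]
      rw [this]
      simp only [Bool.false_eq_true, if_false]
      have : fs.filter (fun f => f.1 == k) = [] := by
        rw [List.filter_eq_nil_iff]
        intro g hg
        have := hp.1 g hg; simp; omega
      rw [this]

lemma run_drop (k : Nat) (rest : List (Nat × List Char)) :
    rest.Pairwise (fun a b => a.1 ≤ b.1) → (∀ f ∈ rest, k ≤ f.1) →
    ∀ f ∈ rest.dropWhile (fun f => f.1 == k), k < f.1 := by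
  induction rest with
  | nil => intro _ _ f hf; simp at hf
  | cons f fs ih =>
    intro hp hlb
    rw [List.pairwise_cons] at hp
    rw [List.dropWhile_cons]
    by_cases hf : f.1 = k
    · have : (f.1 == k) = true := by simp [hf]
      rw [this]
      simp only [if_true]
      exact ih hp.2 (fun g hg => by have := hp.1 g hg; omega)
    · have hk : k < f.1 := by have := hlb f (by simp); omega
      have : (f.1 == k) = false := by simp [hf]
      rw [this]
      simp only [Bool.false_eq_true, if_false]
      intro g hg
      rcases List.mem_cons.mp hg with h | h
      · subst h; omega
      · have := hp.1 g h; omega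

lemma assemble_rows : ∀ (n : Nat) (evs : List (Nat × List Char)), evs.length ≤ n →
    ∀ (out : List (List Char)),
    evs.Pairwise (fun a b => a.1 ≤ b.1) →
    assembleB out evs = (List.range out.length).map (fun r =>
      if (evs.filter (fun e => e.1 == r)) = [] then out.getD r [] else pvRow evs r) := by
  intro n
  induction n with
  | zero =>
    intro evs hn out _
    have : evs = [] := List.length_eq_zero_iff.mp (by omega)
    subst this
    simp only [assembleB, List.filter_nil, if_pos rfl]
    exact (map_getD_range_self out).symm
  | succ n ih =>
    intro evs hn out hp
    cases evs with
    | nil =>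
      simp only [assembleB, List.filter_nil, if_pos rfl]
      exact (map_getD_range_self out).symm
    | cons e rest =>
      rw [List.pairwise_cons] at hp
      have hlb : ∀ f ∈ rest, e.1 ≤ f.1 := hp.1
      have htake := run_take e.1 rest hp.2 hlb
      have hdrop := run_drop e.1 rest hp.2 hlb
      set rest' := rest.dropWhile (fun f => f.1 == e.1) with hrd
      have hsub : rest'.Sublist rest := List.dropWhile_sublist _
      have hlen' : rest'.length ≤ n := by
        have h1 : rest'.length ≤ rest.length := List.length_dropWhile_le _ _
        simp only [List.length_cons] at hn
        omega
      have hv : ((e :: rest.takeWhile (fun f => f.1 == e.1)).map Prod.snd).flatten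
          = pvRow (e :: rest) e.1 := by
        rw [htake, pvRow, List.filter_cons]
        have : (e.1 == e.1) = true := by simp
        rw [this]
        simp
      rw [show assembleB out (e :: rest)
          = assembleB (out.set e.1 ((e :: rest.takeWhile (fun f => f.1 == e.1)).map
              Prod.snd).flatten) rest' from by rw [assembleB]]
      rw [hv]
      have hset_len : (out.set e.1 (pvRow (e :: rest) e.1)).length = out.length := by simp
      rw [ih rest' hlen' _ (hp.2.sublist hsub)]
      rw [hset_len]
      apply List.map_congr_left
      intro r hr
      rw [List.mem_range] at hr
      by_cases hre : r = e.1
      · have hne : ¬((e :: rest).filter (fun e' => e'.1 == r) = []) := by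
          rw [List.filter_cons]
          have hb : (e.1 == r) = true := by simp [hre]
          rw [hb]
          simp
        rw [if_neg hne]
        have hnil : rest'.filter (fun e' => e'.1 == r) = [] := by
          rw [List.filter_eq_nil_iff]
          intro g hg
          have := hdrop g hg
          simp
          omega
        rw [if_pos hnil, hre]
        have hke : e.1 < out.length := hre ▸ hr
        simp [List.getD_eq_getElem?_getD, List.getElem?_set_self hke]
      · have hfe : (e :: rest).filter (fun e' => e'.1 == r)
            = rest'.filter (fun e' => e'.1 == r) := by
          rw [List.filter_cons]
          have : (e.1 == r) = false := by simp; omega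
          rw [this]
          simp only [Bool.false_eq_true, if_false]
          conv_lhs => rw [show rest = rest.takeWhile (fun f => f.1 == e.1) ++ rest' from
            (List.takeWhile_append_dropWhile).symm]
          rw [List.filter_append]
          have htw : (rest.takeWhile (fun f => f.1 == e.1)).filter
              (fun e' => e'.1 == r) = [] := by
            rw [List.filter_eq_nil_iff]
            intro g hg
            have := List.mem_takeWhile_imp hg
            simp at this ⊢
            omega
          rw [htw, List.nil_append]
        by_cases hnil : rest'.filter (fun e' => e'.1 == r) = []
        · have hnil2 : (e :: rest).filter (fun e' => e'.1 == r) = [] := by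
            rw [hfe]; exact hnil
          rw [if_pos hnil, if_pos hnil2]
          simp [List.getD_eq_getElem?_getD, List.getElem?_set_ne (by omega : e.1 ≠ r)]
        · have hnil2 : ¬((e :: rest).filter (fun e' => e'.1 == r) = []) := by
            rw [hfe]; exact hnil
          rw [if_neg hnil, if_neg hnil2]
          rw [pvRow, pvRow, hfe]

-- ===== VERDICT (by name: the statement is the Claim_ definition above) =====
theorem merge_drawing_spec : Claim_equal_merge_drawing := by
  intro pieces hdom hpre
  unfold Spec_merge_drawing
  rw [A_char, B_char]
  rw [mainLemma (pvSize pieces) _ _ 0 0 (by simp)]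
  rw [ev_fold (pvSize pieces) _ [] 0 0]
  rw [List.nil_append]
  have hsorted := PySem.List.sorted_pairwise
    (pvEvents ((pieces.map (fun p => PySem.Chars.splitOn p.toList ['/'])).zip
      (pvStarts (pvSize pieces) 0 0 (pieces.map (fun p => PySem.Chars.splitOn p.toList ['/'])))))
    (fun e => e.1)
  rw [assemble_rows _ _ le_rfl _ hsorted]
  rw [List.length_replicate]
  congr 1
  apply congrArg
  apply List.map_congr_left
  intro r hr
  rw [List.mem_range] at hr
  have hA : (List.replicate (pvSize pieces) ([] : List Char)).getD r [] = [] := by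
    rw [List.getD_eq_getElem?_getD, List.getElem?_replicate_of_lt hr]; rfl
  rw [hA, List.nil_append, gather_eq_row, filter_sorted]
  by_cases hnil : (pvEvents ((pieces.map (fun p => PySem.Chars.splitOn p.toList ['/'])).zip
      (pvStarts (pvSize pieces) 0 0
        (pieces.map (fun p => PySem.Chars.splitOn p.toList ['/']))))).filter
      (fun e => e.1 == r) = []
  · rw [if_pos hnil, pvRow, hnil]
    rfl
  · rw [if_neg hnil, pvRow, pvRow, filter_sorted]
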